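-- pv_equiv track=rewrite | github.com/Abhik6/Python | 6. Recursion/return_all_codes.py | return_all_codes_helper
-- ===== SOURCE A (Python) =====
-- def get_char(value: int) -> str:
--     if value<=0 or value>26:
--         return ""
--     return chr(96+value)
--
-- def return_all_codes_helper(s: str, index: int) -> list:
--
--     # Base Case
--     if s == '' or len(s) == index:
--         return ['']
--
--     # Recursion call
--     single_digit = int(s[index])
--     single_digit_recursion_codes = return_all_codes_helper(s, index+1)
--
--     # My Work
--     single_char = get_char(single_digit)
--     codes = []
--     for code in single_digit_recursion_codes:
--         codes.append(single_char + code)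
--
--     if len(s)>1 and index+1<len(s):
--         double_digit = int(s[index:index+2])
--         if double_digit in range(10,27):
--             # Recursion call
--             double_digit_recursion_codes = return_all_codes_helper(s, index+2)
--             # My Work
--             double_char = get_char(double_digit)
--             for code in double_digit_recursion_codes:
--                 codes.append(double_char + code)
--
--     return codes
-- ===== SOURCE B (Python) =====
-- def get_char(value: int) -> str:
--     if value <= 0 or value > 26:
--         return ""
--     return chr(96 + value)
--
--
-- def return_all_codes_helper(s: str, index: int) -> list:
--     # Bottom-up: sweep i from the end of the string down to index, keeping the
--     # decodings of s[i+1:] and s[i+2:] in two accumulators instead of recursing.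
--     if s == '' or len(s) == index:
--         return ['']
--     n = len(s)
--     nxt, nxt2 = [''], []          # decodings of the suffix starting at i+1, i+2
--     for i in reversed(range(index, n)):
--         res = [get_char(int(s[i])) + code for code in nxt]
--         if i + 1 < n:
--             dd = int(s[i:i + 2])
--             if 10 <= dd <= 26:
--                 res += [get_char(dd) + code for code in nxt2]
--         nxt, nxt2 = res, nxt
--     return nxt
-- ===== Notes on version B (the rewrite author's own statement) =====
-- stated objective: alternative
-- what changed: Replaces A's top-down branching recursion (two recursive calls per position) by a single bottom-up right-to-left sweep that keeps the decodings of the two following suffixes in two accumulators.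
-- outside the precondition, e.g. on return_all_codes_helper('7', -1): A returns ['gg'], B returns ['gg']
import Mathlib
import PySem

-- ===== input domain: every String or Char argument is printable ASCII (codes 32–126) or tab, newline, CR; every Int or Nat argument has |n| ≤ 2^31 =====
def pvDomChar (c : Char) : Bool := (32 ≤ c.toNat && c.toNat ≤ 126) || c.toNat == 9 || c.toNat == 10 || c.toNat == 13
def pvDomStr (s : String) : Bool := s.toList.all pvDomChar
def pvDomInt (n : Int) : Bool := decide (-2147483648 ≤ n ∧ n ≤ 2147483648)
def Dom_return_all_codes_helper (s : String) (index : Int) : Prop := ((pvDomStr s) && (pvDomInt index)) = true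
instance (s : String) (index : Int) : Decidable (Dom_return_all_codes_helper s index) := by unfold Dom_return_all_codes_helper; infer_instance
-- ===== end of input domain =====

-- B replaces A's branching double recursion by a single bottom-up sweep over the string
-- (two accumulators holding the decodings of the two following suffixes): alternative/simpler,
-- no speed claim is made. Equality of the RETURN value is what is proved, on Pre_ below.

-- ===== PORT A =====
def get_char (value : Int) : String :=
  if value ≤ 0 ∨ value > 26 then ""
  else String.ofList [Char.ofNat (96 + value).toNat]

def return_all_codes_helper (s : String) (index : Int) : List String :=
  -- Base Case
  if s = "" ∨ (s.toList.length : Int) = index then [""]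
  else
    match hg : PySem.List.pyGet? s.toList index with
    | none => []            -- IndexError
    | some ch =>
      match PySem.Int.ofChars? [ch] with
      | none => []          -- ValueError
      | some single_digit =>
        -- Recursion call
        let single_digit_recursion_codes := return_all_codes_helper s (index + 1)
        -- My Work
        let single_char := get_char single_digit
        let codes := single_digit_recursion_codes.foldl
          (fun acc code => acc ++ [single_char ++ code]) []
        if 1 < (s.toList.length : Int) ∧ index + 1 < (s.toList.length : Int) then
          match PySem.Int.ofChars? (PySem.List.slice s.toList (some index) (some (index + 2))) with
          | none => []      -- ValueError
          | some double_digit =>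
            if 10 ≤ double_digit ∧ double_digit < 27 then
              -- Recursion call
              let double_digit_recursion_codes := return_all_codes_helper s (index + 2)
              -- My Work
              let double_char := get_char double_digit
              double_digit_recursion_codes.foldl
                (fun acc code => acc ++ [double_char ++ code]) codes
            else codes
        else codes
termination_by (s.toList.length + 2 - index).toNat
decreasing_by
  all_goals
    have hin : PySem.Raise.InRange s.toList.length index := by
      by_contra hn
      rw [← PySem.List.pyGet?_eq_none_iff (xs := s.toList) (i := index)] at hn
      simp [hn] at hg
    rcases hin with ⟨_, hlt⟩
    omega

-- ===== PORT B =====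
-- one iteration of B's loop: state = (decodings of s[i+1:], decodings of s[i+2:])
def pvStep (cs : List Char) (n : Int) (p : List String × List String) (i : Int) :
    List String × List String :=
  match PySem.List.pyGet? cs i with
  | none => ([], p.1)       -- IndexError (unreachable under Pre_)
  | some ch =>
    match PySem.Int.ofChars? [ch] with
    | none => ([], p.1)     -- ValueError (unreachable under Pre_)
    | some sd =>
      let res := p.1.map (fun code => get_char sd ++ code)
      let res :=
        if i + 1 < n then
          match PySem.Int.ofChars? (PySem.List.slice cs (some i) (some (i + 2))) with
          | none => res     -- ValueError (unreachable under Pre_)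
          | some dd =>
            if 10 ≤ dd ∧ dd < 27 then
              res ++ p.2.map (fun code => get_char dd ++ code)
            else res
        else res
      (res, p.1)

def return_all_codes_helper_alt (s : String) (index : Int) : List String :=
  if s = "" ∨ (s.toList.length : Int) = index then [""]
  else
    let cs := s.toList
    let n : Int := cs.length
    (((PySem.List.pyRange index n 1).reverse).foldl (pvStep cs n) ([""], [])).1

-- ===== PRECONDITION & SPEC =====
-- Pre_ excludes inputs where A raises (a non-digit at or after index, index out of range)
-- and negative indices: there Python's wraparound makes A raise ValueError on an empty
-- two-character slice, except on one-character strings, a degenerate corner where both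
-- A and B return the same doubled decoding (see the cite).
def Pre_return_all_codes_helper (s : String) (index : Int) : Prop :=
  s = "" ∨ (0 ≤ index ∧ index ≤ (s.toList.length : Int) ∧
    (s.toList.drop index.toNat).all PySem.Chars.isdigit = true)
instance (s : String) (index : Int) : Decidable (Pre_return_all_codes_helper s index) := by
  unfold Pre_return_all_codes_helper; infer_instance

def pvWitness_return_all_codes_helper : String × Int := ("1226", 0)

def Spec_return_all_codes_helper (s : String) (index : Int) (out : List String) : Prop := out = return_all_codes_helper_alt s index
instance (s : String) (index : Int) (out : List String) : Decidable (Spec_return_all_codes_helper s index out) := by unfold Spec_return_all_codes_helper; infer_instance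

-- ===== CLAIM (what is proved, stated in full; the proofs are below) =====
def Claim_equal_return_all_codes_helper : Prop := ∀ (s : String) (index : Int), Dom_return_all_codes_helper s index → Pre_return_all_codes_helper s index → Spec_return_all_codes_helper s index (return_all_codes_helper s index)

-- ===== LEMMAS AND PROOFS =====
theorem digit_cases (c : Char) (h : PySem.Chars.isdigit c = true) :
    c ∈ ['0','1','2','3','4','5','6','7','8','9'] := by
  simp [PySem.Chars.isdigit, Char.le_def] at h
  obtain ⟨h1, h2⟩ := h
  have h1' : 48 ≤ c.val.toNat := UInt32.le_iff_toNat_le.mp h1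
  have h2' : c.val.toNat ≤ 57 := UInt32.le_iff_toNat_le.mp h2
  have hofn : Char.ofNat c.val.toNat = c := Char.ofNat_toNat c
  interval_cases hm : c.val.toNat
    <;> subst hofn <;> decide

theorem ofChars?_digit1 (c : Char) (h : PySem.Chars.isdigit c = true) :
    (PySem.Int.ofChars? [c]).isSome = true := by
  have hm := digit_cases c h
  fin_cases hm <;> decide

theorem ofChars?_digit2 (c d : Char) (hc : PySem.Chars.isdigit c = true)
    (hd : PySem.Chars.isdigit d = true) :
    (PySem.Int.ofChars? [c, d]).isSome = true := by
  have hmc := digit_cases c hc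
  have hmd := digit_cases d hd
  fin_cases hmc <;> fin_cases hmd <;> decide

theorem foldl_append_singleton (f : String → String) (l : List String) (init : List String) :
    l.foldl (fun acc code => acc ++ [f code]) init = init ++ l.map f := by
  induction l generalizing init with
  | nil => simp
  | cons x xs ih => simp [List.foldl_cons, ih]

theorem getElem_mem_drop (l : List Char) (m j : Nat) (h1 : m ≤ j) (h2 : j < l.length) :
    l[j] ∈ l.drop m := by
  have h : l[j] = (l.drop m)[j - m]'(by rw [List.length_drop]; omega) := by
    rw [List.getElem_drop]
    congr 1
    omega
  rw [h]
  exact List.getElem_mem _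

theorem loop_eq (s : String) (idx : Int) (hidx : 0 ≤ idx)
    (hdig : (s.toList.drop idx.toNat).all PySem.Chars.isdigit = true)
    (k : Int) (hk1 : idx ≤ k) (hk2 : k ≤ (s.toList.length : Int)) :
    ((PySem.List.pyRange k (s.toList.length : Int) 1).reverse.foldl
        (pvStep s.toList (s.toList.length : Int)) ([""], []))
      = (return_all_codes_helper s k,
         if k < (s.toList.length : Int) then return_all_codes_helper s (k + 1) else []) := by
  rcases eq_or_lt_of_le hk2 with heq | hlt
  · -- k = length: empty range, A's base case
    rw [PySem.List.pyRange_one_eq_nil (le_of_eq heq.symm)]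
    rw [return_all_codes_helper, if_pos (Or.inr heq.symm), if_neg (by omega)]
    rfl
  · -- k < length: peel the last loop iteration (i = k) and use the IH at k+1
    have hk0 : 0 ≤ k := le_trans hidx hk1
    have hkl : k.toNat < s.toList.length := by omega
    have hdigAt : ∀ j : Nat, idx.toNat ≤ j → (hj : j < s.toList.length) →
        PySem.Chars.isdigit s.toList[j] = true := by
      intro j hj1 hj2
      rw [List.all_eq_true] at hdig
      apply hdig
      exact getElem_mem_drop _ _ _ hj1 hj2
    have hget : PySem.List.pyGet? s.toList k = some (s.toList[k.toNat]) :=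
      PySem.List.pyGet?_eq_some_getElem s.toList hk0 (by omega)
    obtain ⟨sd, hsd⟩ := Option.isSome_iff_exists.mp
      (ofChars?_digit1 _ (hdigAt k.toNat (by omega) hkl))
    have hguard : ¬(s = "" ∨ (s.toList.length : Int) = k) := by
      rintro (h | h)
      · subst h; simp at hkl
      · omega
    rw [PySem.List.pyRange_one_cons hlt, List.reverse_cons, List.foldl_append,
        loop_eq s idx hidx hdig (k + 1) (by omega) (by omega),
        List.foldl_cons, List.foldl_nil]
    conv_rhs => rw [return_all_codes_helper]
    rw [if_neg hguard, if_pos hlt]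
    by_cases hkk : k + 1 < (s.toList.length : Int)
    · rw [if_pos hkk]
      have hcond : 1 < (s.toList.length : Int) ∧ k + 1 < (s.toList.length : Int) :=
        ⟨by omega, hkk⟩
      have hk1l : k.toNat + 1 < s.toList.length := by omega
      have hsl : PySem.List.slice s.toList (some k) (some (k + 2)) =
          [s.toList[k.toNat], s.toList[k.toNat + 1]] := by
        rw [PySem.List.slice_toNat s.toList hk0 (by omega)]
        have h2 : (k + 2).toNat - k.toNat = 2 := by omega
        rw [h2, List.drop_eq_getElem_cons hkl, List.drop_eq_getElem_cons hk1l]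
        rfl
      have hddS : (PySem.Int.ofChars? (PySem.List.slice s.toList (some k)
          (some (k + 2)))).isSome = true := by
        rw [hsl]
        exact ofChars?_digit2 _ _ (hdigAt k.toNat (by omega) hkl)
          (hdigAt (k.toNat + 1) (by omega) hk1l)
      obtain ⟨dd, hdd⟩ := Option.isSome_iff_exists.mp hddS
      split
      · next heq => rw [hget] at heq; exact absurd heq (by simp)
      · next ch heq =>
        rw [hget] at heq
        injection heq with heq
        subst heq
        split
        · next heq2 => rw [hsd] at heq2; exact absurd heq2 (by simp)
        · next sd' heq2 =>
          rw [hsd] at heq2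
          injection heq2 with heq2
          subst heq2
          rw [if_pos hcond]
          simp only [pvStep, hget, hsd, hdd, foldl_append_singleton, List.nil_append,
            if_pos hkk]
          by_cases hr : 10 ≤ dd ∧ dd < 27
          · rw [if_pos hr, if_pos hr, show k + 1 + 1 = k + 2 from by ring]
          · rw [if_neg hr, if_neg hr]
    · rw [if_neg hkk]
      have hcond : ¬(1 < (s.toList.length : Int) ∧ k + 1 < (s.toList.length : Int)) := by
        rintro ⟨_, h⟩; omega
      split
      · next heq => rw [hget] at heq; exact absurd heq (by simp)
      · next ch heq =>
        rw [hget] at heq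
        injection heq with heq
        subst heq
        split
        · next heq2 => rw [hsd] at heq2; exact absurd heq2 (by simp)
        · next sd' heq2 =>
          rw [hsd] at heq2
          injection heq2 with heq2
          subst heq2
          rw [if_neg hcond]
          simp only [pvStep, hget, hsd, foldl_append_singleton, List.nil_append,
            if_neg hkk]
termination_by (s.toList.length + 1 - k).toNat
decreasing_by omega

-- ===== VERDICT (by name: the statement is the Claim_ definition above) =====
theorem return_all_codes_helper_spec : Claim_equal_return_all_codes_helper := by
  intro s index _hdom hpre
  unfold Spec_return_all_codes_helper return_all_codes_helper_alt
  by_cases hg : s = "" ∨ (s.toList.length : Int) = index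
  · rw [return_all_codes_helper]
    simp only [if_pos hg]
  · simp only [if_neg hg]
    rcases hpre with h0 | ⟨h1, h2, h3⟩
    · exact absurd (Or.inl h0) hg
    have hlt : index < (s.toList.length : Int) := by
      rcases lt_or_eq_of_le h2 with h | h
      · exact h
      · exact absurd (Or.inr h.symm) hg
    show _ = (((PySem.List.pyRange index (s.toList.length : Int) 1).reverse).foldl
        (pvStep s.toList (s.toList.length : Int)) ([""], [])).1
    rw [loop_eq s index h1 h3 index le_rfl h2]
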